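-- pv_equiv track=rewrite | github.com/kevinkim-dev/self_study | Baekjoon/self_study/silver_1/21314.py | max_mks
-- ===== SOURCE A (Python) =====
-- def max_mks(N):
--     num = ''
--     m = 0
--     for i in range(len(N)):
--         if N[i] == 'K':
--             num += '5' + '0'*m
--             m = 0
--         else:
--             m += 1
--     if m:
--         num += '1'*m
--     return int(num)
-- ===== SOURCE B (Python) =====
-- def max_mks(N):
--     parts = N.split('K')
--     num = ''.join('5' + '0' * len(p) for p in parts[:-1]) + '1' * len(parts[-1])
--     return int(num)
-- ===== Notes on version B (the rewrite author's own statement) =====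
-- stated objective: simpler
-- what changed: Replaces the char-by-char counter loop with a split('K') decomposition: each piece before a 'K' becomes '5'+'0'*len(piece) and the trailing piece becomes '1'*len(piece).
import Mathlib
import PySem

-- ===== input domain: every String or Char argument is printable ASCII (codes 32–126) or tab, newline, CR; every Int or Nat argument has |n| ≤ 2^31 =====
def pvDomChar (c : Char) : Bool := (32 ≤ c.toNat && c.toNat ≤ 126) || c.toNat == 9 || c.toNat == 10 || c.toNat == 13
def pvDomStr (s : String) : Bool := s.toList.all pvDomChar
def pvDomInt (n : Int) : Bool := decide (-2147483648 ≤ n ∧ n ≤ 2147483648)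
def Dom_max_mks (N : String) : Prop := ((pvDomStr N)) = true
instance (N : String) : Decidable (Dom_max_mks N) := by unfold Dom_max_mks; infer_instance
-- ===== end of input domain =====

-- B replaces A's char-by-char counter pass with a split('K') decomposition over the runs between K's (objective: simpler).


-- ===== PORT A =====
-- loop body: on 'K' append '5'+'0'*m and reset m, otherwise m += 1
def pvStep (st : List Char × Int) (c : Char) : List Char × Int :=
  if c = 'K' then (st.1 ++ '5' :: PySem.List.pyRepeat ['0'] st.2, 0) else (st.1, st.2 + 1)

-- after the loop: if m: num += '1'*m
def pvFinalize (s : List Char × Int) : List Char :=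
  if s.2 ≠ 0 then s.1 ++ PySem.List.pyRepeat ['1'] s.2 else s.1

def max_mks (N : String) : Int :=
  (PySem.Int.ofChars? (pvFinalize (N.toList.foldl pvStep ([], 0)))).getD 0
  -- int(num); on empty N Python raises ValueError (int('')), excluded by Pre_

-- ===== PORT B =====
-- ''.join('5' + '0'*len(p) for p in parts[:-1]) + '1'*len(parts[-1])
def pvCombine (parts : List (List Char)) : List Char :=
  PySem.Chars.join []
      (parts.dropLast.map (fun p => '5' :: PySem.List.pyRepeat ['0'] (p.length : Int)))
    ++ PySem.List.pyRepeat ['1'] (((parts.getLastD []).length : Int))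

def max_mks_alt (N : String) : Int :=
  (PySem.Int.ofChars? (pvCombine (PySem.Chars.splitOn N.toList ['K']))).getD 0
  -- int(num); B raises ValueError only on empty N, excluded by Pre_

-- ===== PRECONDITION & SPEC =====
-- Pre_ excludes only the empty string, on which both Pythons raise ValueError (int('')).
def Pre_max_mks (N : String) : Prop := N ≠ ""
instance (N : String) : Decidable (Pre_max_mks N) := by unfold Pre_max_mks; infer_instance
def pvWitness_max_mks : String := "MKKMMK"

def Spec_max_mks (N : String) (out : Int) : Prop := out = max_mks_alt N
instance (N : String) (out : Int) : Decidable (Spec_max_mks N out) := by unfold Spec_max_mks; infer_instance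

-- ===== CLAIM (what is proved, stated in full; the proofs are below) =====
def Claim_equal_max_mks : Prop := ∀ (N : String), Dom_max_mks N → Pre_max_mks N → Spec_max_mks N (max_mks N)

-- ===== LEMMAS AND PROOFS =====

-- A's loop as a pure recursion on the remaining characters.
def pvTail : List Char → Int → List Char
  | [], m => if m ≠ 0 then PySem.List.pyRepeat ['1'] m else []
  | c :: cs, m =>
    if c = 'K' then '5' :: PySem.List.pyRepeat ['0'] m ++ pvTail cs 0
    else pvTail cs (m + 1)

lemma pvFoldA (cs : List Char) : ∀ (num : List Char) (m : Int),
    pvFinalize (cs.foldl pvStep (num, m)) = num ++ pvTail cs m := by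
  induction cs with
  | nil => intro num m; by_cases h : m = 0 <;> simp [pvFinalize, pvTail, h]
  | cons c cs ih =>
    intro num m
    by_cases h : c = 'K'
    · rw [List.foldl_cons, show pvStep (num, m) c = (num ++ '5' :: PySem.List.pyRepeat ['0'] m, 0)
        from by simp [pvStep, h], ih, pvTail]
      simp [h]
    · rw [List.foldl_cons, show pvStep (num, m) c = (num, m + 1) from by simp [pvStep, h], ih, pvTail]
      simp [h]

-- split on a single 'K' as a pure recursion, with the prefix of the current piece reversed.
def pvSplit : List Char → List Char → List (List Char)
  | cur, [] => [cur.reverse]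
  | cur, c :: cs => if c = 'K' then cur.reverse :: pvSplit [] cs else pvSplit (c :: cur) cs

lemma pvSplit_ne_nil (cur cs) : pvSplit cur cs ≠ [] := by
  induction cs generalizing cur with
  | nil => simp [pvSplit]
  | cons c cs ih => by_cases h : c = 'K' <;> simp [pvSplit, h, ih]

lemma pvGo_eq (cs : List Char) : ∀ (fuel : Nat) (cur : List Char) (acc : List (List Char)), cs.length ≤ fuel →
    PySem.Chars.splitOn.go ['K'] fuel cs cur acc = acc.reverse ++ pvSplit cur cs := by
  induction cs with
  | nil =>
    intro fuel cur acc _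
    cases fuel <;> simp [PySem.Chars.splitOn.go, pvSplit]
  | cons c cs ih =>
    intro fuel cur acc hf
    cases fuel with
    | zero => simp at hf
    | succ f =>
      by_cases h : c = 'K'
      · simp [PySem.Chars.splitOn.go, List.isPrefixOf, h, pvSplit,
          ih f, Nat.le_of_succ_le_succ hf]
      · simp [PySem.Chars.splitOn.go, List.isPrefixOf, h, Ne.symm h, pvSplit,
          ih f, Nat.le_of_succ_le_succ hf]

lemma pvSplitOn_eq (cs : List Char) : PySem.Chars.splitOn cs ['K'] = pvSplit [] cs := by
  simpa using pvGo_eq cs (cs.length + 1) [] [] (by omega)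

lemma pvJoin_flatten (l : List (List Char)) : PySem.Chars.join [] l = l.flatten := by
  induction l with
  | nil => simp [PySem.Chars.join, List.intercalate]
  | cons x l ih =>
    cases l <;> simp_all [PySem.Chars.join, List.intercalate, List.intersperse]

lemma pvCombine_cons (p q : List Char) (ps : List (List Char)) :
    pvCombine (p :: q :: ps) = '5' :: PySem.List.pyRepeat ['0'] (p.length : Int) ++ pvCombine (q :: ps) := by
  simp [pvCombine, pvJoin_flatten]

lemma pvMain (cs : List Char) : ∀ (cur : List Char),
    pvCombine (pvSplit cur cs) = pvTail cs (cur.length : Int) := by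
  induction cs with
  | nil =>
    intro cur
    by_cases h : cur = []
    · simp [pvSplit, pvCombine, pvTail, h]
    · simp [pvSplit, pvCombine, pvTail]

  | cons c cs ih =>
    intro cur
    by_cases h : c = 'K'
    · obtain ⟨a, l, hh⟩ : ∃ a l, pvSplit [] cs = a :: l := by
        cases hh : pvSplit [] cs with
        | nil => exact absurd hh (pvSplit_ne_nil [] cs)
        | cons a l => exact ⟨a, l, rfl⟩
      calc pvCombine (pvSplit cur (c :: cs))
          = pvCombine (cur.reverse :: a :: l) := by rw [pvSplit]; simp [h, hh]
        _ = '5' :: PySem.List.pyRepeat ['0'] (cur.length : Int) ++ pvCombine (pvSplit [] cs) := by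
            rw [pvCombine_cons, hh]; simp
        _ = pvTail (c :: cs) (cur.length : Int) := by
            have h0 := ih ([] : List Char)
            simp only [List.length_nil, Nat.cast_zero] at h0
            rw [pvTail]; simp [h, h0]
    · have h1 := ih (c :: cur)
      rw [show pvSplit cur (c :: cs) = pvSplit (c :: cur) cs from by rw [pvSplit]; simp [h],
        h1, pvTail]
      simp [h]

-- ===== VERDICT (by name: the statement is the Claim_ definition above) =====
theorem max_mks_spec : Claim_equal_max_mks := by
  intro N _ _
  show max_mks N = max_mks_alt N
  rw [max_mks, max_mks_alt, pvFoldA, pvSplitOn_eq]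
  have := pvMain N.toList []
  simp only [List.length_nil, Nat.cast_zero] at this
  rw [this]
  simp
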